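-- pv_equiv track=rewrite | github.com/ricemaster1/bad-apple-asm | emit_segments.py | best_horizontal_shift
-- ===== SOURCE A (Python) =====
-- from typing import Set, Tuple, List
--
-- def best_horizontal_shift(prev_set: Set[int], cur_set: Set[int], w: int, max_shift: int = 64) -> Tuple[int, int]:
--     best_dx = 0
--     best_overlap = 0
--     prev_rows = {}
--     for idx in prev_set:
--         y = idx // w
--         x = idx % w
--         prev_rows.setdefault(y, set()).add(x)
--     cur_rows = {}
--     for idx in cur_set:
--         y = idx // w
--         x = idx % w
--         cur_rows.setdefault(y, set()).add(x)
--
--     for dx in range(-max_shift, max_shift + 1):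
--         overlap = 0
--         for y, cur_xs in cur_rows.items():
--             prev_xs = prev_rows.get(y)
--             if not prev_xs:
--                 continue
--             shifted = {x - dx for x in cur_xs if 0 <= x - dx < w}
--             overlap += len(shifted & prev_xs)
--         if overlap > best_overlap:
--             best_overlap = overlap
--             best_dx = dx
--     return best_dx, best_overlap
-- ===== SOURCE B (Python) =====
-- from typing import Set, Tuple
--
-- def best_horizontal_shift(prev_set: Set[int], cur_set: Set[int], w: int, max_shift: int = 64) -> Tuple[int, int]:
--     # Group previous-frame pixels by row (only x's inside the window [0, w)).
--     prev_rows = {}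
--     for idx in prev_set:
--         px = idx % w
--         if 0 <= px < w:
--             prev_rows.setdefault(idx // w, []).append(px)
--     # One pass over pairs: histogram of dx = x - px over same-row pixel pairs.
--     hist = {}
--     for idx in cur_set:
--         y = idx // w
--         x = idx % w
--         for px in prev_rows.get(y, ()):
--             d = x - px
--             hist[d] = hist.get(d, 0) + 1
--     best_dx = 0
--     best_overlap = 0
--     for dx in range(-max_shift, max_shift + 1):
--         ov = hist.get(dx, 0)
--         if ov > best_overlap:
--             best_dx = dx
--             best_overlap = ov
--     return best_dx, best_overlap
-- ===== Notes on version B (the rewrite author's own statement) =====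
-- stated objective: faster
-- what changed: A rescans every row pair for each of the 2*max_shift+1 candidate shifts via per-row set intersections; B builds a histogram of dx = x - px over same-row pixel pairs in one pass and then scans the dx window once.
-- outside the precondition, e.g. on best_horizontal_shift({0}, {1}, 0, 1): A raises ZeroDivisionError, B raises ZeroDivisionError
import Mathlib
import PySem

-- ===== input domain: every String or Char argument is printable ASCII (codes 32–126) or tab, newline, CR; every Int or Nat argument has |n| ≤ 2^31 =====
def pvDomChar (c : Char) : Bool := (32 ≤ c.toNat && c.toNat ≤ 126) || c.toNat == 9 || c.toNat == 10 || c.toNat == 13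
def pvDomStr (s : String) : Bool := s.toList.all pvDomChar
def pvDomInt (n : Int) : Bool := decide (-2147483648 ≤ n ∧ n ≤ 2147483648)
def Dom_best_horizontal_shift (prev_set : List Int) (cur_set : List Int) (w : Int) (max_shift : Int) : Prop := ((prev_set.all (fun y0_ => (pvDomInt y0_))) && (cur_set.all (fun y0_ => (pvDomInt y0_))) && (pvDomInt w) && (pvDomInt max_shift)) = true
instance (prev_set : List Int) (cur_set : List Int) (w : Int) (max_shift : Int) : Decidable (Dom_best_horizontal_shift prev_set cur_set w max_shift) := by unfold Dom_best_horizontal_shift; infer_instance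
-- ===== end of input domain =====

-- B replaces A's scan over every candidate shift (each recomputing per-row set
-- intersections) by one histogram of dx = x - px over same-row pixel pairs,
-- then a single scan of the dx window (objective: faster).

-- ===== PORT A =====
def best_horizontal_shift (prev_set : List Int) (cur_set : List Int) (w : Int) (max_shift : Int) : Int × Int :=
  -- prev_rows = {}; for idx in prev_set: prev_rows.setdefault(idx // w, set()).add(idx % w)
  let prev_rows : PySem.Dict Int (PySem.Set Int) :=
    prev_set.foldl (fun d idx =>
      d.modify (PySem.Int.floordiv idx w) PySem.Set.empty
        (fun s => PySem.Set.add s (PySem.Int.mod idx w))) PySem.Dict.empty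
  let cur_rows : PySem.Dict Int (PySem.Set Int) :=
    cur_set.foldl (fun d idx =>
      d.modify (PySem.Int.floordiv idx w) PySem.Set.empty
        (fun s => PySem.Set.add s (PySem.Int.mod idx w))) PySem.Dict.empty
  -- for dx in range(-max_shift, max_shift + 1): …
  (PySem.List.pyRange (-max_shift) (max_shift + 1) 1).foldl
    (fun best dx =>
      let overlap : Int :=
        cur_rows.items.foldl (fun acc yxs =>
          match prev_rows.get? yxs.1 with
          | none => acc                              -- prev_xs is None: falsy, continue
          | some prev_xs =>
            if prev_xs = [] then acc                 -- empty set: falsy, continue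
            else
              let shifted : PySem.Set Int :=
                PySem.Set.ofList (yxs.2.filterMap
                  (fun x => if 0 ≤ x - dx ∧ x - dx < w then some (x - dx) else none))
              acc + (PySem.Set.len (PySem.Set.inter shifted prev_xs) : Int)) 0
      if overlap > best.2 then (dx, overlap) else best)
    ((0 : Int), (0 : Int))

-- ===== PORT B =====
-- prev_rows: row -> list of window x's of the previous frame
def bhsRowsB (prev_set : List Int) (w : Int) : PySem.Dict Int (List Int) :=
  prev_set.foldl (fun d idx =>
    let px := PySem.Int.mod idx w
    if 0 ≤ px ∧ px < w then
      d.modify (PySem.Int.floordiv idx w) [] (fun l => l ++ [px])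
    else d) PySem.Dict.empty

-- hist: dx -> number of same-row pairs (x in cur row, px in prev row) with x - px = dx
def bhsHistB (prev_rows : PySem.Dict Int (List Int)) (cur_set : List Int) (w : Int) :
    PySem.Dict Int Int :=
  cur_set.foldl (fun h idx =>
    let y := PySem.Int.floordiv idx w
    let x := PySem.Int.mod idx w
    (prev_rows.getD y []).foldl (fun h px => h.modify (x - px) 0 (· + 1)) h)
    PySem.Dict.empty

def best_horizontal_shift_alt (prev_set : List Int) (cur_set : List Int) (w : Int) (max_shift : Int) : Int × Int :=
  let prev_rows := bhsRowsB prev_set w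
  let hist := bhsHistB prev_rows cur_set w
  (PySem.List.pyRange (-max_shift) (max_shift + 1) 1).foldl
    (fun best dx =>
      let ov := hist.getD dx 0
      if ov > best.2 then (dx, ov) else best)
    ((0 : Int), (0 : Int))

-- ===== PRECONDITION & SPEC =====
-- Pre_ excludes w = 0 (A raises ZeroDivisionError there) and lists with duplicate
-- elements: the parameters are Python sets (Set[int]), so under the type convention
-- the lists hold distinct elements (a duplicate-carrying list denotes the same set,
-- on which both Pythons agree, but A's port dedups it per row while B's port counts it).
def Pre_best_horizontal_shift (prev_set : List Int) (cur_set : List Int) (w : Int) (max_shift : Int) : Prop :=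
  w ≠ 0 ∧ prev_set.Nodup ∧ cur_set.Nodup
instance (prev_set : List Int) (cur_set : List Int) (w : Int) (max_shift : Int) : Decidable (Pre_best_horizontal_shift prev_set cur_set w max_shift) := by unfold Pre_best_horizontal_shift; infer_instance
def pvWitness_best_horizontal_shift : List Int × List Int × Int × Int := ([0, 3, 4], [1, 4, 5], 3, 2)

def Spec_best_horizontal_shift (prev_set : List Int) (cur_set : List Int) (w : Int) (max_shift : Int) (out : Int × Int) : Prop := out = best_horizontal_shift_alt prev_set cur_set w max_shift
instance (prev_set : List Int) (cur_set : List Int) (w : Int) (max_shift : Int) (out : Int × Int) : Decidable (Spec_best_horizontal_shift prev_set cur_set w max_shift out) := by unfold Spec_best_horizontal_shift; infer_instance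

-- ===== CLAIM (what is proved, stated in full; the proofs are below) =====
def Claim_equal_best_horizontal_shift : Prop := ∀ (prev_set : List Int) (cur_set : List Int) (w : Int) (max_shift : Int), Dom_best_horizontal_shift prev_set cur_set w max_shift → Pre_best_horizontal_shift prev_set cur_set w max_shift → Spec_best_horizontal_shift prev_set cur_set w max_shift (best_horizontal_shift prev_set cur_set w max_shift)

-- ===== LEMMAS AND PROOFS =====

-- row and column of a pixel index
def bhsR (w c : Int) : Int := PySem.Int.floordiv c w
def bhsM (w c : Int) : Int := PySem.Int.mod c w
-- the x's of row y of list l (A's grouping, before set-dedup)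
def bhsFib (w : Int) (l : List Int) (y : Int) : List Int :=
  (l.filter (fun c => bhsR w c == y)).map (bhsM w)
-- the window x's of row y (B's grouping)
def bhsW (w : Int) (prev : List Int) (y : Int) : List Int :=
  ((prev.filter (fun p => decide (0 ≤ bhsM w p ∧ bhsM w p < w) && (bhsR w p == y))).map (bhsM w))

-- B's per-element pair count for element c at shift dx
def bhsTerm (w : Int) (prev : List Int) (dx c : Int) : Int :=
  ((bhsW w prev (bhsR w c)).countP (fun px => bhsM w c - px == dx) : Int)

lemma bhsRowsB_getD_aux (w : Int) (l : List Int) (d : PySem.Dict Int (List Int)) (y : Int) :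
    (l.foldl (fun d idx =>
      let px := PySem.Int.mod idx w
      if 0 ≤ px ∧ px < w then
        d.modify (PySem.Int.floordiv idx w) [] (fun l => l ++ [px])
      else d) d).getD y [] = d.getD y [] ++ bhsW w l y := by
  induction l generalizing d with
  | nil => simp [bhsW]
  | cons idx l ih =>
    simp only [List.foldl_cons]
    by_cases hwin : 0 ≤ PySem.Int.mod idx w ∧ PySem.Int.mod idx w < w
    · rw [if_pos hwin, ih]
      rw [PySem.Dict.getD_modify]
      by_cases hy : y = PySem.Int.floordiv idx w
      · rw [if_pos hy]
        have : bhsW w (idx :: l) y = PySem.Int.mod idx w :: bhsW w l y := by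
          simp only [bhsW, List.filter_cons]
          have : (decide (0 ≤ bhsM w idx ∧ bhsM w idx < w) && (bhsR w idx == y)) = true := by
            simp [bhsM, bhsR, hwin, hy.symm]
          rw [this]
          simp [bhsM]
        rw [this, hy, List.append_assoc, List.singleton_append]
      · rw [if_neg hy]
        have : bhsW w (idx :: l) y = bhsW w l y := by
          simp only [bhsW, List.filter_cons]
          have : (decide (0 ≤ bhsM w idx ∧ bhsM w idx < w) && (bhsR w idx == y)) = false := by
            simp [bhsM, bhsR]
            intro _ _ h
            exact absurd h.symm hy
          rw [this]
          simp
        rw [this]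
    · rw [if_neg hwin, ih]
      have : bhsW w (idx :: l) y = bhsW w l y := by
        simp only [bhsW, List.filter_cons]
        have : (decide (0 ≤ bhsM w idx ∧ bhsM w idx < w) && (bhsR w idx == y)) = false := by
          simp [bhsM, bhsR]
          intro h1 h2
          exact absurd ⟨h1, h2⟩ hwin
        rw [this]
        simp
      rw [this]

lemma bhsRowsB_getD (prev : List Int) (w y : Int) :
    (bhsRowsB prev w).getD y [] = bhsW w prev y := by
  have := bhsRowsB_getD_aux w prev PySem.Dict.empty y
  simpa [bhsRowsB, PySem.Dict.getD_empty] using this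

lemma bhsHistB_getD_aux (w : Int) (rows : PySem.Dict Int (List Int)) (l : List Int)
    (h : PySem.Dict Int Int) (dx : Int) :
    (l.foldl (fun h idx =>
      let y := PySem.Int.floordiv idx w
      let x := PySem.Int.mod idx w
      (rows.getD y []).foldl (fun h px => h.modify (x - px) 0 (· + 1)) h) h).getD dx 0
    = h.getD dx 0 + (l.map (fun c => (((rows.getD (bhsR w c) []).countP (fun px => bhsM w c - px == dx) : Nat) : Int))).sum := by
  induction l generalizing h with
  | nil => simp
  | cons c l ih =>
    simp only [List.foldl_cons]
    rw [ih]
    have inner : ((rows.getD (PySem.Int.floordiv c w) []).foldl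
        (fun h px => h.modify (PySem.Int.mod c w - px) 0 (· + 1)) h).getD dx 0
        = h.getD dx 0 + ((rows.getD (bhsR w c) []).countP (fun px => bhsM w c - px == dx) : Nat) := by
      have h1 := PySem.Dict.getD_foldl_modify_add_one
        ((rows.getD (PySem.Int.floordiv c w) []).map (fun px => PySem.Int.mod c w - px)) h dx
      rw [List.foldl_map] at h1
      rw [h1, List.count_eq_countP, List.countP_map]
      simp [Function.comp_def, bhsR, bhsM]
    rw [inner]
    simp only [List.map_cons, List.sum_cons]
    ring

lemma bhsHistB_getD (prev cur : List Int) (w dx : Int) :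
    (bhsHistB (bhsRowsB prev w) cur w).getD dx 0 = (cur.map (bhsTerm w prev dx)).sum := by
  have := bhsHistB_getD_aux w (bhsRowsB prev w) cur PySem.Dict.empty dx
  simp only [bhsHistB] at *
  rw [this]
  simp only [PySem.Dict.getD_empty, zero_add]
  congr 1
  exact List.map_congr_left (fun c _ => by simp [bhsTerm, bhsRowsB_getD, bhsR, bhsM])

-- A's grouping loop
lemma bhsGroupA_getD_aux (w : Int) (l : List Int) (d : PySem.Dict Int (PySem.Set Int)) (y : Int) :
    (l.foldl (fun d idx =>
      d.modify (PySem.Int.floordiv idx w) PySem.Set.empty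
        (fun s => PySem.Set.add s (PySem.Int.mod idx w))) d).getD y PySem.Set.empty
    = PySem.Set.update (d.getD y PySem.Set.empty) (bhsFib w l y) := by
  induction l generalizing d with
  | nil => simp [bhsFib, PySem.Set.update_nil]
  | cons idx l ih =>
    simp only [List.foldl_cons]
    rw [ih, PySem.Dict.getD_modify]
    by_cases hy : y = PySem.Int.floordiv idx w
    · rw [if_pos hy]
      have : bhsFib w (idx :: l) y = bhsM w idx :: bhsFib w l y := by
        simp only [bhsFib, List.filter_cons]
        have : (bhsR w idx == y) = true := by simp [bhsR, hy.symm]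
        rw [this]
        simp
      rw [this, PySem.Set.update_cons]
      simp [bhsM, hy]
    · rw [if_neg hy]
      have : bhsFib w (idx :: l) y = bhsFib w l y := by
        simp only [bhsFib, List.filter_cons]
        have : (bhsR w idx == y) = false := by
          simp [bhsR]
          exact fun h => absurd h.symm hy
        rw [this]
        simp
      rw [this]

lemma bhsGroupA_getD (w : Int) (l : List Int) (y : Int) :
    (l.foldl (fun d idx =>
      d.modify (PySem.Int.floordiv idx w) PySem.Set.empty
        (fun s => PySem.Set.add s (PySem.Int.mod idx w))) PySem.Dict.empty).getD y PySem.Set.empty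
    = PySem.Set.ofList (bhsFib w l y) := by
  rw [bhsGroupA_getD_aux]
  simp [PySem.Dict.getD_empty, PySem.Set.update_nil_left]

lemma bhsGroupA_keys (w : Int) (l : List Int) :
    (l.foldl (fun d idx =>
      d.modify (PySem.Int.floordiv idx w) PySem.Set.empty
        (fun s => PySem.Set.add s (PySem.Int.mod idx w))) PySem.Dict.empty).keys
    = PySem.Set.ofList (l.map (bhsR w)) := by
  have := PySem.Dict.keys_foldl_modify_key l (fun idx => PySem.Int.floordiv idx w)
    PySem.Set.empty (fun _ idx => fun s => PySem.Set.add s (PySem.Int.mod idx w)) PySem.Dict.empty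
  simpa [PySem.Dict.keys_empty, PySem.Set.update_nil_left, bhsR] using this

-- injective image of a row fiber
lemma bhs_map_fiber_nodup (w y : Int) (l : List Int) (hl : l.Nodup) (q : Int → Bool)
    (hq : ∀ c, q c = true → bhsR w c = y) : ((l.filter q).map (bhsM w)).Nodup := by
  apply List.Nodup.map_on _ (hl.filter q)
  intro a ha b hb hm
  have hra := hq a (List.mem_filter.mp ha).2
  have hrb := hq b (List.mem_filter.mp hb).2
  have h1 := PySem.Int.floordiv_mul_add_mod a w
  have h2 := PySem.Int.floordiv_mul_add_mod b w
  simp only [bhsR] at hra hrb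
  simp only [bhsM] at hm
  rw [hra] at h1
  rw [hrb] at h2
  rw [hm] at h1
  exact h1.symm.trans h2

lemma bhsFib_nodup (w : Int) (_hw : w ≠ 0) (l : List Int) (hl : l.Nodup) (y : Int) :
    (bhsFib w l y).Nodup := by
  apply bhs_map_fiber_nodup w y l hl
  intro c h
  simpa using h

lemma bhsW_nodup (w : Int) (_hw : w ≠ 0) (l : List Int) (hl : l.Nodup) (y : Int) :
    (bhsW w l y).Nodup := by
  apply bhs_map_fiber_nodup w y l hl
  intro c h
  simp at h
  exact h.2

lemma bhsW_mem (w : Int) (prev : List Int) (y v : Int) :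
    v ∈ bhsW w prev y ↔ (0 ≤ v ∧ v < w) ∧ v ∈ bhsFib w prev y := by
  simp only [bhsW, bhsFib, List.mem_map, List.mem_filter, Bool.and_eq_true,
    decide_eq_true_eq, beq_iff_eq]
  constructor
  · rintro ⟨p, ⟨hp, hwin, hr⟩, rfl⟩
    exact ⟨hwin, p, ⟨hp, hr⟩, rfl⟩
  · rintro ⟨hwin, p, ⟨hp, hr⟩, rfl⟩
    exact ⟨p, ⟨hp, hwin, hr⟩, rfl⟩

lemma bhs_filterMap_if {α β : Type} (p : α → Prop) [DecidablePred p] (f : α → β) (l : List α) :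
    l.filterMap (fun x => if p x then some (f x) else none)
    = (l.filter (fun x => decide (p x))).map f := by
  induction l with
  | nil => rfl
  | cons a l ih =>
    by_cases h : p a <;> simp [List.filter_cons, h, ih]

-- sum of an indicator over a Nodup list
lemma bhs_sum_ite_mem (k : Int) (a : Int) (ys : List Int) (hnd : ys.Nodup) (hk : k ∈ ys) :
    (ys.map (fun y => if k = y then a else 0)).sum = a := by
  induction ys with
  | nil => simp at hk
  | cons y ys ih =>
    rcases List.mem_cons.mp hk with h | h
    · subst h
      have : (ys.map (fun y => if k = y then a else 0)).sum = 0 := by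
        apply List.sum_eq_zero
        intro x hx
        rcases List.mem_map.mp hx with ⟨y', hy', rfl⟩
        have : k ≠ y' := fun h => (List.nodup_cons.mp hnd).1 (h ▸ hy')
        simp [this]
      simp [this]
    · have hk2 : k ≠ y := by
        rintro rfl
        exact (List.nodup_cons.mp hnd).1 h
      simp [hk2, ih (List.nodup_cons.mp hnd).2 h]

-- partitioning a sum by key
lemma bhs_partition (l : List Int) (key : Int → Int) (g : Int → Int) (ys : List Int)
    (hnd : ys.Nodup) (hcov : ∀ c ∈ l, key c ∈ ys) :
    (ys.map (fun y => ((l.filter (fun c => key c == y)).map g).sum)).sum = (l.map g).sum := by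
  induction l with
  | nil => simp
  | cons c l ih =>
    have step : ∀ y : Int, (((c :: l).filter (fun c' => key c' == y)).map g).sum
        = (if key c = y then g c else 0) + ((l.filter (fun c' => key c' == y)).map g).sum := by
      intro y
      by_cases h : key c = y <;> simp [List.filter_cons, h]
    have : (ys.map (fun y => (((c :: l).filter (fun c' => key c' == y)).map g).sum)).sum
        = (ys.map (fun y => (if key c = y then g c else 0) + ((l.filter (fun c' => key c' == y)).map g).sum)).sum := by
      congr 1
      exact List.map_congr_left (fun y _ => step y)
    rw [this, PySem.List.sum_map_add_int,
      bhs_sum_ite_mem (key c) (g c) ys hnd (hcov c (List.mem_cons_self)),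
      ih (fun c' hc' => hcov c' (List.mem_cons_of_mem c hc'))]
    simp

-- B's per-prev-row count of a single shifted x is an indicator
lemma bhsCountB (w : Int) (hw : w ≠ 0) (prev : List Int) (hp : prev.Nodup) (y dx v : Int) :
    (bhsW w prev y).countP (fun px => v - px == dx)
    = if (0 ≤ v - dx ∧ v - dx < w) ∧ (v - dx) ∈ bhsFib w prev y then 1 else 0 := by
  have h1 : (bhsW w prev y).countP (fun px => v - px == dx)
      = List.count (v - dx) (bhsW w prev y) := by
    rw [List.count_eq_countP]
    apply List.countP_congr
    intro px _
    simp only [beq_iff_eq]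
    omega
  by_cases hm : (v - dx) ∈ bhsW w prev y
  · rw [h1, List.count_eq_one_of_mem (bhsW_nodup w hw prev hp y) hm,
      if_pos ((bhsW_mem w prev y (v - dx)).mp hm)]
  · rw [h1, List.count_eq_zero_of_not_mem hm, if_neg]
    intro hcon
    exact hm ((bhsW_mem w prev y (v - dx)).mpr hcon)

-- the per-row term of A's overlap loop equals B's pair count over that row
lemma bhsRowEq (w : Int) (hw : w ≠ 0) (prev cur : List Int) (hp : prev.Nodup) (hc : cur.Nodup)
    (y dx : Int) :
    (match (prev.foldl (fun d idx =>
        d.modify (PySem.Int.floordiv idx w) PySem.Set.empty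
          (fun s => PySem.Set.add s (PySem.Int.mod idx w))) PySem.Dict.empty).get? y with
     | none => (0 : Int)
     | some prev_xs =>
       if prev_xs = [] then (0 : Int)
       else PySem.Set.len (PySem.Set.inter
         (PySem.Set.ofList ((PySem.Set.ofList (bhsFib w cur y)).filterMap
           (fun x => if 0 ≤ x - dx ∧ x - dx < w then some (x - dx) else none))) prev_xs))
    = ((cur.filter (fun c => bhsR w c == y)).map (bhsTerm w prev dx)).sum := by
  set ind : Int → Int := fun x =>
    if (0 ≤ x - dx ∧ x - dx < w) ∧ (x - dx) ∈ bhsFib w prev y then (1 : Int) else 0 with hind_def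
  -- the right-hand side is the indicator sum over the cur fiber's x's
  have hRHS : ((cur.filter (fun c => bhsR w c == y)).map (bhsTerm w prev dx)).sum
      = ((bhsFib w cur y).map ind).sum := by
    have h1 : ((cur.filter (fun c => bhsR w c == y)).map (bhsTerm w prev dx)).sum
        = ((cur.filter (fun c => bhsR w c == y)).map (fun c => ind (bhsM w c))).sum := by
      congr 1
      apply List.map_congr_left
      intro c hc'
      have hrc : bhsR w c = y := by simpa using (List.mem_filter.mp hc').2
      simp only [bhsTerm, hrc, bhsCountB w hw prev hp y dx (bhsM w c), hind_def]
      split_ifs <;> simp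
    rw [h1]
    unfold bhsFib
    rw [List.map_map]
    rfl
  rw [hRHS]
  -- and that indicator sum is a countP
  have hsum : ((bhsFib w cur y).map ind).sum
      = ((bhsFib w cur y).countP
          (fun x => decide ((0 ≤ x - dx ∧ x - dx < w) ∧ (x - dx) ∈ bhsFib w prev y)) : Nat) := by
    have hindb : ind = fun x =>
        if (decide ((0 ≤ x - dx ∧ x - dx < w) ∧ (x - dx) ∈ bhsFib w prev y)) = true
        then (1 : Int) else 0 := by
      funext x
      rw [hind_def]
      split_ifs with h1 <;> simp_all
    rw [hindb, PySem.List.sum_map_ite_one_zero]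
  rw [hsum]
  have hkeys := bhsGroupA_keys w prev
  by_cases hy : y ∈ prev.map (bhsR w)
  · -- prev has row y
    have hmemk : y ∈ (prev.foldl (fun d idx =>
        d.modify (PySem.Int.floordiv idx w) PySem.Set.empty
          (fun s => PySem.Set.add s (PySem.Int.mod idx w))) PySem.Dict.empty).keys := by
      rw [hkeys]
      exact (PySem.Set.mem_ofList _ _).mpr hy
    obtain ⟨P, hP⟩ : ∃ P, (prev.foldl (fun d idx =>
        d.modify (PySem.Int.floordiv idx w) PySem.Set.empty
          (fun s => PySem.Set.add s (PySem.Int.mod idx w))) PySem.Dict.empty).get? y = some P := by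
      cases hopt : (prev.foldl (fun d idx =>
          d.modify (PySem.Int.floordiv idx w) PySem.Set.empty
            (fun s => PySem.Set.add s (PySem.Int.mod idx w))) PySem.Dict.empty).get? y with
      | none => exact absurd ((PySem.Dict.get?_eq_none_iff_not_mem_keys _ _).mp hopt) (not_not.mpr hmemk)
      | some P => exact ⟨P, rfl⟩
    have hPval : P = PySem.Set.ofList (bhsFib w prev y) := by
      have := bhsGroupA_getD w prev y
      rw [PySem.Dict.getD_eq_get?_getD, hP] at this
      simpa using this
    have hfibne : bhsFib w prev y ≠ [] := by
      rcases List.mem_map.mp hy with ⟨p, hpmem, hpr⟩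
      intro hnil
      have : bhsM w p ∈ bhsFib w prev y := by
        apply List.mem_map_of_mem
        rw [List.mem_filter]
        exact ⟨hpmem, by simp [hpr]⟩
      rw [hnil] at this
      exact absurd this (List.not_mem_nil)
    have hPne : P ≠ [] := by
      rw [hPval]
      cases hfib : bhsFib w prev y with
      | nil => exact absurd hfib hfibne
      | cons a l => rw [PySem.Set.ofList_cons]; simp
    rw [hP]
    simp only []
    rw [if_neg hPne]
    have hfcnd : (bhsFib w cur y).Nodup := bhsFib_nodup w hw cur hc y
    rw [PySem.Set.ofList_eq_self_of_nodup _ hfcnd,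
      bhs_filterMap_if (fun x => 0 ≤ x - dx ∧ x - dx < w) (fun x => x - dx) (bhsFib w cur y)]
    have hshnd : (((bhsFib w cur y).filter
        (fun x => decide (0 ≤ x - dx ∧ x - dx < w))).map (fun x => x - dx)).Nodup := by
      apply List.Nodup.map _ (hfcnd.filter _)
      intro a b h
      simp only at h
      omega
    rw [PySem.Set.ofList_eq_self_of_nodup _ hshnd]
    simp only [PySem.Set.inter, PySem.Set.len, hPval]
    rw [← List.countP_eq_length_filter, List.countP_map, List.countP_filter]
    congr 1
    apply List.countP_congr
    intro x _
    simp only [Function.comp_apply, Bool.and_eq_true, decide_eq_true_eq,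
      PySem.Set.contains_eq_listContains, List.contains_iff_mem, PySem.Set.mem_ofList]
    constructor
    · rintro ⟨hmem, hwin⟩
      exact ⟨hwin, hmem⟩
    · rintro ⟨hwin, hmem⟩
      exact ⟨hmem, hwin⟩
  · -- prev has no row y: A contributes 0 and so does every indicator
    have hnone : (prev.foldl (fun d idx =>
        d.modify (PySem.Int.floordiv idx w) PySem.Set.empty
          (fun s => PySem.Set.add s (PySem.Int.mod idx w))) PySem.Dict.empty).get? y = none := by
      rw [PySem.Dict.get?_eq_none_iff_not_mem_keys, hkeys]
      intro hmem
      exact hy ((PySem.Set.mem_ofList _ _).mp hmem)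
    have hfibnil : bhsFib w prev y = [] := by
      rw [List.eq_nil_iff_forall_not_mem]
      intro v hv
      rcases List.mem_map.mp hv with ⟨p, hpf, rfl⟩
      have hpm := List.mem_filter.mp hpf
      exact hy (List.mem_map.mpr ⟨p, hpm.1, by simpa using hpm.2⟩)
    rw [hnone]
    have : ((bhsFib w cur y).countP
        (fun x => decide ((0 ≤ x - dx ∧ x - dx < w) ∧ (x - dx) ∈ bhsFib w prev y))) = 0 := by
      apply List.countP_eq_zero.mpr
      intro x _
      simp [hfibnil]
    rw [this]
    simp

-- a fold that adds a per-key quantity is the sum of those quantities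
lemma bhs_foldl_add_congr (l : List Int) (M : Int → Int → Int) (g : Int → Int)
    (h : ∀ acc y, M acc y = acc + g y) (a : Int) :
    l.foldl M a = a + (l.map g).sum := by
  induction l generalizing a with
  | nil => simp
  | cons y l ih =>
    simp only [List.foldl_cons, List.map_cons, List.sum_cons, ih, h]
    ring

-- A's whole overlap for a given dx equals B's histogram entry
lemma bhsOverlapEq (w : Int) (hw : w ≠ 0) (prev cur : List Int) (hp : prev.Nodup) (hc : cur.Nodup)
    (dx : Int) :
    ((cur.foldl (fun d idx =>
        d.modify (PySem.Int.floordiv idx w) PySem.Set.empty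
          (fun s => PySem.Set.add s (PySem.Int.mod idx w))) PySem.Dict.empty).items.foldl
      (fun acc yxs =>
        match (prev.foldl (fun d idx =>
            d.modify (PySem.Int.floordiv idx w) PySem.Set.empty
              (fun s => PySem.Set.add s (PySem.Int.mod idx w))) PySem.Dict.empty).get? yxs.1 with
        | none => acc
        | some prev_xs =>
          if prev_xs = [] then acc
          else
            acc + PySem.Set.len (PySem.Set.inter
              (PySem.Set.ofList (yxs.2.filterMap
                (fun x => if 0 ≤ x - dx ∧ x - dx < w then some (x - dx) else none))) prev_xs)) 0)
    = (bhsHistB (bhsRowsB prev w) cur w).getD dx 0 := by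
  have hndk : (cur.foldl (fun d idx =>
      d.modify (PySem.Int.floordiv idx w) PySem.Set.empty
        (fun s => PySem.Set.add s (PySem.Int.mod idx w))) PySem.Dict.empty).keys.Nodup :=
    PySem.Dict.nodup_keys_foldl_modify_key cur (fun idx => PySem.Int.floordiv idx w)
      PySem.Set.empty _ PySem.Dict.empty PySem.Dict.nodup_keys_empty
  rw [PySem.Dict.items_eq_map_keys _ hndk PySem.Set.empty, List.foldl_map]
  have hstep : ∀ (acc y : Int),
      (match (prev.foldl (fun d idx =>
          d.modify (PySem.Int.floordiv idx w) PySem.Set.empty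
            (fun s => PySem.Set.add s (PySem.Int.mod idx w))) PySem.Dict.empty).get? y with
       | none => acc
       | some prev_xs =>
         if prev_xs = [] then acc
         else
           acc + PySem.Set.len (PySem.Set.inter
             (PySem.Set.ofList (((cur.foldl (fun d idx =>
                 d.modify (PySem.Int.floordiv idx w) PySem.Set.empty
                   (fun s => PySem.Set.add s (PySem.Int.mod idx w))) PySem.Dict.empty).getD y
                 PySem.Set.empty).filterMap
               (fun x => if 0 ≤ x - dx ∧ x - dx < w then some (x - dx) else none))) prev_xs))
      = acc + ((cur.filter (fun c => bhsR w c == y)).map (bhsTerm w prev dx)).sum := by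
    intro acc y
    have hrow := bhsRowEq w hw prev cur hp hc y dx
    rw [bhsGroupA_getD w cur y]
    cases hopt : (prev.foldl (fun d idx =>
        d.modify (PySem.Int.floordiv idx w) PySem.Set.empty
          (fun s => PySem.Set.add s (PySem.Int.mod idx w))) PySem.Dict.empty).get? y with
    | none =>
      simp only [hopt] at hrow
      simp only []
      rw [← hrow]
      ring
    | some P =>
      simp only [hopt] at hrow
      simp only []
      by_cases hPnil : P = []
      · rw [if_pos hPnil, ← hrow, if_pos hPnil]
        ring
      · rw [if_neg hPnil, ← hrow, if_neg hPnil]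
  rw [bhs_foldl_add_congr _ _ _ hstep 0, bhsGroupA_keys w cur,
    bhs_partition cur (bhsR w) (bhsTerm w prev dx) _ (PySem.Set.nodup_ofList _)
      (fun c hcm => (PySem.Set.mem_ofList _ _).mpr (List.mem_map_of_mem hcm)),
    bhsHistB_getD]
  ring

-- ===== VERDICT (by name: the statement is the Claim_ definition above) =====
theorem best_horizontal_shift_spec : Claim_equal_best_horizontal_shift := by
  intro prev cur w ms _ hpre
  obtain ⟨hw, hp, hc⟩ := hpre
  unfold Spec_best_horizontal_shift
  simp only [best_horizontal_shift, best_horizontal_shift_alt]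
  congr 1
  funext best dx
  rw [bhsOverlapEq w hw prev cur hp hc dx]
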